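-- pv_equiv track=rewrite | github.com/anthony-lamelas/Intro-Python-Work | Homeworks/HW10/hw10_q1.py | group_students
-- ===== SOURCE A (Python) =====
-- def group_students(spec, pref):
--
--     club_list = []
--     length = len(spec)
--
--     for index in range(length):
--         club_list.append([])
--
--
--     for (student, club) in pref:
--         for i in range(length):
--             spec_club, count = spec[i]
--             if club == spec_club and count > 0:
--                 club_list[i].append(student)
--                 spec[i] = (spec_club, count - 1)
--
--
--     return club_list
-- ===== SOURCE B (Python) =====
-- def group_students(spec, pref):
--     by_club = {}
--     for student, club in pref:
--         by_club.setdefault(club, []).append(student)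
--     result = []
--     for i, (name, count) in enumerate(spec):
--         q = by_club.get(name, [])
--         k = max(min(count, len(q)), 0)
--         result.append(q[:k])
--         spec[i] = (name, count - k)
--     return result
-- ===== Notes on version B (the rewrite author's own statement) =====
-- stated objective: alternative
-- what changed: B builds a club->students dict in one pass over pref and then gives each spec entry (name,count) the first min(count,len) students of its club's list, instead of A's per-student rescan of the whole spec list; like A, B mutates spec with the remaining counts.
import Mathlib
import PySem

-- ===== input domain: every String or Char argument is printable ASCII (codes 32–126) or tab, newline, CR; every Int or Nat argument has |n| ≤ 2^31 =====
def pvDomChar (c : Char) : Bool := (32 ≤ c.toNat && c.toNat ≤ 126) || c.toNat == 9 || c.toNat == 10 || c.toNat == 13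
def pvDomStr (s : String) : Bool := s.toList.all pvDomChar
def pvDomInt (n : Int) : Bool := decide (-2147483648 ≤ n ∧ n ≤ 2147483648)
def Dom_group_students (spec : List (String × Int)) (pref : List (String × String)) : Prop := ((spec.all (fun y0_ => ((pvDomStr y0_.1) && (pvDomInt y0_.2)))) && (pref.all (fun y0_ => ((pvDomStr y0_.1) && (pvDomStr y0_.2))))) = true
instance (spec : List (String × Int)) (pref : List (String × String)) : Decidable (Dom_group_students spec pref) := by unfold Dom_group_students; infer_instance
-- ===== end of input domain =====

-- B replaces A's per-student rescan of spec by a single dict pass over pref plus a prefix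
-- per spec entry; the equivalence proved is about the RETURN value — both Pythons
-- also mutate spec in place, with the same final contents.

-- ===== PORT A =====
-- A's inner `for i in range(length)` reads/writes spec[i] and club_list[i] in lockstep;
-- it is transcribed as the obvious structural recursion over the two parallel lists,
-- computing the same updated spec and club_list (no break in the Python loop).
def innerA (student club : String) :
    List (String × Int) → List (List String) → List (String × Int) × List (List String)
  | [], cls => ([], cls)
  | sc :: rest, [] => (sc :: rest, [])
  | (n, cnt) :: rest, cl :: cls =>
    if club == n && decide (0 < cnt) then
      ((n, cnt - 1) :: (innerA student club rest cls).1,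
       (cl ++ [student]) :: (innerA student club rest cls).2)
    else ((n, cnt) :: (innerA student club rest cls).1, cl :: (innerA student club rest cls).2)

def group_students (spec : List (String × Int)) (pref : List (String × String)) : List (List String) :=
  -- club_list = []; for index in range(length): club_list.append([])
  let club_list : List (List String) :=
    (List.range spec.length).foldl (fun acc _ => acc ++ [[]]) []
  -- for (student, club) in pref: inner loop over the spec indices
  (pref.foldl (fun st p => innerA p.1 p.2 st.1 st.2) (spec, club_list)).2

-- ===== PORT B =====
def group_students_alt (spec : List (String × Int)) (pref : List (String × String)) : List (List String) :=
  -- by_club.setdefault(club, []).append(student)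
  let byClub : PySem.Dict String (List String) :=
    pref.foldl (fun d p => d.modify p.2 [] (fun q => q ++ [p.1])) PySem.Dict.empty
  -- result loop over spec (the spec[i] writes do not affect the returned value)
  spec.map (fun p =>
    let q := byClub.getD p.1 []
    let k : Int := max (min p.2 (q.length : Int)) 0
    PySem.List.slice q none (some k))

-- ===== PRECONDITION & SPEC =====
def Spec_group_students (spec : List (String × Int)) (pref : List (String × String)) (out : List (List String)) : Prop := out = group_students_alt spec pref
instance (spec : List (String × Int)) (pref : List (String × String)) (out : List (List String)) : Decidable (Spec_group_students spec pref out) := by unfold Spec_group_students; infer_instance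

-- ===== CLAIM (what is proved, stated in full; the proofs are below) =====
def Claim_equal_group_students : Prop := ∀ (spec : List (String × Int)) (pref : List (String × String)), Dom_group_students spec pref → Spec_group_students spec pref (group_students spec pref)

-- ===== LEMMAS AND PROOFS =====

/-- The students (in order) whose preferred club is `name`. -/
def studentsOf (name : String) (pref : List (String × String)) : List String :=
  (pref.filter (fun q => q.2 == name)).map Prod.fst

theorem studentsOf_cons (name s c : String) (rest : List (String × String)) :
    studentsOf name ((s, c) :: rest)
      = if c == name then s :: studentsOf name rest else studentsOf name rest := by
  by_cases hm : c == name
  · simp [studentsOf, hm]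
  · have hf : (c == name) = false := by simpa using hm
    simp [studentsOf, hf]

theorem innerA_len (s c : String) :
    ∀ (spec : List (String × Int)) (cls : List (List String)),
      cls.length = spec.length →
      (innerA s c spec cls).1.length = spec.length ∧
      (innerA s c spec cls).2.length = cls.length := by
  intro spec
  induction spec with
  | nil => intro cls h; simp_all [innerA]
  | cons hd tl ih =>
    rintro (_ | ⟨cl, cls⟩) h
    · simp at h
    · obtain ⟨n, cnt⟩ := hd
      simp [innerA]
      have := ih cls (by simpa using h)
      split <;> simp_all

theorem innerA_zip (s c : String) (rest : List (String × String)) :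
    ∀ (spec : List (String × Int)) (cls : List (List String)),
      cls.length = spec.length →
      List.zipWith (fun (p : String × Int) cl => cl ++ (studentsOf p.1 rest).take p.2.toNat)
        (innerA s c spec cls).1 (innerA s c spec cls).2
      = List.zipWith (fun (p : String × Int) cl => cl ++ (studentsOf p.1 ((s, c) :: rest)).take p.2.toNat)
        spec cls := by
  intro spec
  induction spec with
  | nil => intro cls h; simp [innerA]
  | cons hd tl ih =>
    rintro (_ | ⟨cl, cls⟩) h
    · simp at h
    · obtain ⟨n, cnt⟩ := hd
      have ih' := ih cls (by simpa using h)
      by_cases hm : c == n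
      · by_cases hpos : (0 : Int) < cnt
        · have hsplit : cnt.toNat = (cnt - 1).toNat + 1 := by omega
          have hh : studentsOf n ((s, c) :: rest) = s :: studentsOf n rest := by
            rw [studentsOf_cons, if_pos hm]
          simp only [innerA, hm, Bool.true_and, decide_eq_true_eq]
          rw [if_pos hpos, List.zipWith_cons_cons, ih']
          congr 1
          simp only [hh, hsplit, List.take_succ_cons, List.append_assoc,
            List.singleton_append]
        · have h0 : cnt.toNat = 0 := by omega
          have hh : studentsOf n ((s, c) :: rest) = s :: studentsOf n rest := by
            rw [studentsOf_cons, if_pos hm]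
          simp only [innerA, hm, Bool.true_and, decide_eq_true_eq]
          rw [if_neg hpos, List.zipWith_cons_cons, ih']
          congr 1
          simp only [hh, h0, List.take_zero]
      · have hname : (c == n) = false := by simpa using hm
        simp only [innerA, hname, Bool.false_and, Bool.false_eq_true, if_false,
          List.zipWith_cons_cons]
        rw [ih']
        congr 1
        have hh : studentsOf n ((s, c) :: rest) = studentsOf n rest := by
          rw [studentsOf_cons, if_neg (by simp [hname])]
        simp only [hh]

theorem zipWith_snd {α : Type} {β : Type} :
    ∀ (xs : List α) (ys : List β), ys.length = xs.length →
      List.zipWith (fun _ y => y) xs ys = ys := by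
  intro xs
  induction xs with
  | nil => intro ys h; simp_all
  | cons x xs ih =>
    rintro (_ | ⟨y, ys⟩) h
    · simp at h
    · simp [ih ys (by simpa using h)]

theorem foldA_char :
    ∀ (pref : List (String × String)) (spec : List (String × Int)) (cls : List (List String)),
      cls.length = spec.length →
      (pref.foldl (fun st p => innerA p.1 p.2 st.1 st.2) (spec, cls)).2
      = List.zipWith (fun (p : String × Int) cl => cl ++ (studentsOf p.1 pref).take p.2.toNat)
          spec cls := by
  intro pref
  induction pref with
  | nil =>
    intro spec cls h
    have : List.zipWith (fun (p : String × Int) cl => cl ++ (studentsOf p.1 ([] : List (String × String))).take p.2.toNat) spec cls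
        = List.zipWith (fun _ cl => cl) spec cls := by
      simp [studentsOf]
    rw [this, zipWith_snd spec cls h]
    simp
  | cons hd tl ih =>
    intro spec cls h
    obtain ⟨s, c⟩ := hd
    have hlen := innerA_len s c spec cls h
    have := ih (innerA s c spec cls).1 (innerA s c spec cls).2 (by omega)
    simp only [List.foldl_cons]
    rw [this, innerA_zip s c tl spec cls h]

theorem dict_char :
    ∀ (pref : List (String × String)) (d : PySem.Dict String (List String)) (n : String),
      (pref.foldl (fun d p => d.modify p.2 [] (fun q => q ++ [p.1])) d).getD n []
      = d.getD n [] ++ studentsOf n pref := by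
  intro pref
  induction pref with
  | nil => intro d n; simp [studentsOf]
  | cons hd tl ih =>
    intro d n
    obtain ⟨s, c⟩ := hd
    simp only [List.foldl_cons]
    rw [ih, studentsOf_cons]
    by_cases hm : c = n
    · subst hm
      rw [PySem.Dict.getD_modify_self]
      simp
    · rw [PySem.Dict.getD_modify_of_ne]
      · simp [hm]
      · simpa using fun h => hm h.symm

theorem build_club_list :
    ∀ (l : List ℕ) (init : List (List String)),
      l.foldl (fun acc _ => acc ++ [[]]) init = init ++ List.replicate l.length [] := by
  intro l
  induction l with
  | nil => simp
  | cons x xs ih => intro init; simp [ih, List.replicate_succ]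

theorem zipWith_replicate {α β γ : Type} (f : α → β → γ) :
    ∀ (xs : List α) (y : β), List.zipWith f xs (List.replicate xs.length y)
      = xs.map (fun x => f x y) := by
  intro xs
  induction xs with
  | nil => simp
  | cons x xs ih => intro y; simp [List.replicate_succ, ih]

theorem slice_take (q : List String) (cnt : Int) :
    PySem.List.slice q none (some (max (min cnt (q.length : Int)) 0)) = q.take cnt.toNat := by
  have h0 : (0 : Int) ≤ max (min cnt (q.length : Int)) 0 := le_max_right _ _
  rw [PySem.List.slice_to q h0]
  rcases Nat.le_total q.length cnt.toNat with h | h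
  · rw [List.take_of_length_le h, List.take_of_length_le (by omega)]
  · congr 1
    omega

-- ===== VERDICT (by name: the statement is the Claim_ definition above) =====
theorem group_students_spec : Claim_equal_group_students := by
  intro spec pref _
  unfold Spec_group_students group_students group_students_alt
  rw [build_club_list]
  simp only [List.nil_append, List.length_range]
  rw [foldA_char pref spec _ (by simp),
      zipWith_replicate (fun (p : String × Int) cl => cl ++ (studentsOf p.1 pref).take p.2.toNat) spec]
  apply List.map_congr_left
  intro p _
  have hempty : (PySem.Dict.empty : PySem.Dict String (List String)).getD p.1 [] = [] := by
    simp [PySem.Dict.empty, PySem.Dict.getD, PySem.Dict.get?]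
  have hd := dict_char pref PySem.Dict.empty p.1
  rw [hempty, List.nil_append] at hd
  rw [hd, slice_take]
  simp
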